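-- pv_equiv track=rewrite | github.com/Life-Navigator/life-nav-mvp | services/agents/agents/core/plan_explainer.py | _generate_fallbacks
-- ===== SOURCE A (Python) =====
-- from typing import Any
--
-- def _generate_fallbacks(
--     plan: dict[str, Any], risks: list[dict[str, Any]]
-- ) -> list[dict[str, Any]]:
--     """Generate fallback strategies for identified risks.
--
--     Args:
--         plan: Plan structure.
--         risks: Identified risks.
--
--     Returns:
--         List of fallback strategies.
--     """
--     fallbacks = []
--
--     for risk in risks:
--         description = risk["description"].lower()
--
--         if "data" in description or "transaction" in description:
--             fallbacks.append(
--                 {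
--                     "trigger": "Missing required data",
--                     "action": "Use industry averages or request user input",
--                 }
--             )
--         elif "api" in description:
--             fallbacks.append(
--                 {
--                     "trigger": "External API failure",
--                     "action": "Switch to cached data or alternative API",
--                 }
--             )
--         elif "timeout" in description or "complex" in description:
--             fallbacks.append(
--                 {
--                     "trigger": "Execution exceeds time limit",
--                     "action": "Return partial results and queue remaining work",
--                 }
--             )
--
--     return fallbacks
-- ===== SOURCE B (Python) =====
-- # B: no per-risk branch chain; every keyword carries a priority, all hits are
-- # collected and the MINIMUM priority indexes a fallback table (two staged passes).
-- _KEYWORD_PRIORITY = {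
--     "data": 0, "transaction": 0,
--     "api": 1,
--     "timeout": 2, "complex": 2,
-- }
--
-- _FALLBACK_TABLE = [
--     {"trigger": "Missing required data",
--      "action": "Use industry averages or request user input"},
--     {"trigger": "External API failure",
--      "action": "Switch to cached data or alternative API"},
--     {"trigger": "Execution exceeds time limit",
--      "action": "Return partial results and queue remaining work"},
-- ]
--
-- def _classify(description):
--     hits = [p for kw, p in _KEYWORD_PRIORITY.items() if kw in description]
--     return min(hits) if hits else None
--
-- def _generate_fallbacks(plan, risks):
--     # pass 1: classify each risk; pass 2: map class indices to fallback dicts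
--     indices = [_classify(r["description"].lower()) for r in risks]
--     return [dict(_FALLBACK_TABLE[i]) for i in indices if i is not None]
-- ===== Notes on version B (the rewrite author's own statement) =====
-- stated objective: alternative
-- what changed: Replaces the per-risk if/elif chain by a keyword->priority map: all keyword hits are collected, the minimum priority indexes a fallback table, and the work is split into two staged passes (classify, then map indices to dicts).
import Mathlib
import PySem

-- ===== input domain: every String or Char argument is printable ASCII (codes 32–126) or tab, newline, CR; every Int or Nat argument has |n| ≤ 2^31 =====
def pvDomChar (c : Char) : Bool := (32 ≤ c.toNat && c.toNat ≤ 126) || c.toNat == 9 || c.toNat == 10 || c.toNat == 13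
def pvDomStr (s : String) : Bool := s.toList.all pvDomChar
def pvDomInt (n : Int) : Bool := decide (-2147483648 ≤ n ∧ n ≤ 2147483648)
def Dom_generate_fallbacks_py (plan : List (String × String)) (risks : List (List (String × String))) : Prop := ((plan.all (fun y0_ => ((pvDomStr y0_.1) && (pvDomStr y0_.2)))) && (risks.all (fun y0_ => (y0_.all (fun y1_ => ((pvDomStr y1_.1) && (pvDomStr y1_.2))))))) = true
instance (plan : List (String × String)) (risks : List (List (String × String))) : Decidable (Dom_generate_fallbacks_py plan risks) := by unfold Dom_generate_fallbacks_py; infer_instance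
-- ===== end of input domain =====

-- B replaces A's per-risk if/elif chain by a keyword->priority map: all keyword hits are
-- collected, the minimum priority indexes a fallback table, in two staged passes.


-- ===== PORT A =====
-- literal transliteration of A's if/elif chain, accumulating into `fallbacks`
def pvFbData : List (String × String) :=
  [("trigger", "Missing required data"),
   ("action", "Use industry averages or request user input")]

def pvFbApi : List (String × String) :=
  [("trigger", "External API failure"),
   ("action", "Switch to cached data or alternative API")]

def pvFbTimeout : List (String × String) :=
  [("trigger", "Execution exceeds time limit"),
   ("action", "Return partial results and queue remaining work")]

def generate_fallbacks_py (plan : List (String × String)) (risks : List (List (String × String))) : List (List (String × String)) :=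
  risks.foldl (fun fallbacks risk =>
    -- risk["description"]: KeyError (excluded by Pre_) if absent; getD "" is unreachable inside Pre_
    let description := PySem.Str.lower ((risk.lookup "description").getD "")
    if PySem.Str.isIn "data" description || PySem.Str.isIn "transaction" description then
      fallbacks ++ [pvFbData]
    else if PySem.Str.isIn "api" description then
      fallbacks ++ [pvFbApi]
    else if PySem.Str.isIn "timeout" description || PySem.Str.isIn "complex" description then
      fallbacks ++ [pvFbTimeout]
    else fallbacks) []

-- ===== PORT B =====
-- keyword -> priority map; all hits collected, minimum priority indexes the fallback table
def pvKwPrio : List (String × Nat) :=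
  [("data", 0), ("transaction", 0), ("api", 1), ("timeout", 2), ("complex", 2)]

def pvFbTable : List (List (String × String)) := [pvFbData, pvFbApi, pvFbTimeout]

def pvClassify (description : String) : Option Nat :=
  let hits := pvKwPrio.filterMap (fun p => if PySem.Str.isIn p.1 description then some p.2 else none)
  hits.min?

def generate_fallbacks_py_alt (plan : List (String × String)) (risks : List (List (String × String))) : List (List (String × String)) :=
  let indices := risks.map (fun r =>
    pvClassify (PySem.Str.lower ((r.lookup "description").getD "")))
  indices.filterMap (fun i? => i?.map (fun i => pvFbTable.getD i []))

-- ===== PRECONDITION & SPEC =====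
-- Pre_ excludes exactly the inputs where A raises KeyError: a risk dict without a "description" key.
def Pre_generate_fallbacks_py (plan : List (String × String)) (risks : List (List (String × String))) : Prop :=
  risks.all (fun risk => risk.any (fun kv => kv.1 == "description")) = true
instance (plan : List (String × String)) (risks : List (List (String × String))) : Decidable (Pre_generate_fallbacks_py plan risks) := by unfold Pre_generate_fallbacks_py; infer_instance

def pvWitness_generate_fallbacks_py : (List (String × String)) × (List (List (String × String))) :=
  ([], [[("description", "Data loss risk")], [("description", "slow API")]])

def Spec_generate_fallbacks_py (plan : List (String × String)) (risks : List (List (String × String))) (out : List (List (String × String))) : Prop := out = generate_fallbacks_py_alt plan risks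
instance (plan : List (String × String)) (risks : List (List (String × String))) (out : List (List (String × String))) : Decidable (Spec_generate_fallbacks_py plan risks out) := by unfold Spec_generate_fallbacks_py; infer_instance

-- ===== CLAIM (what is proved, stated in full; the proofs are below) =====
def Claim_equal_generate_fallbacks_py : Prop := ∀ (plan : List (String × String)) (risks : List (List (String × String))), Dom_generate_fallbacks_py plan risks → Pre_generate_fallbacks_py plan risks → Spec_generate_fallbacks_py plan risks (generate_fallbacks_py plan risks)

-- ===== LEMMAS AND PROOFS =====

-- the per-risk value appended by A's if/elif chain, as an Option
def pvStep (risk : List (String × String)) : Option (List (String × String)) :=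
  let description := PySem.Str.lower ((risk.lookup "description").getD "")
  if PySem.Str.isIn "data" description || PySem.Str.isIn "transaction" description then some pvFbData
  else if PySem.Str.isIn "api" description then some pvFbApi
  else if PySem.Str.isIn "timeout" description || PySem.Str.isIn "complex" description then some pvFbTimeout
  else none

-- A's if/elif per-risk choice coincides with B's min-priority classification + table lookup
theorem pvStep_eq_classify (risk : List (String × String)) :
    pvStep risk =
      (pvClassify (PySem.Str.lower ((risk.lookup "description").getD ""))).map
        (fun i => pvFbTable.getD i []) := by
  simp only [pvStep, pvClassify, pvKwPrio, pvFbTable]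
  generalize PySem.Str.lower ((risk.lookup "description").getD "") = d
  simp only [PySem.Str.isIn_eq]
  cases h1 : PySem.Chars.isIn ['d', 'a', 't', 'a'] d.toList <;>
    cases h2 : PySem.Chars.isIn ['t', 'r', 'a', 'n', 's', 'a', 'c', 't', 'i', 'o', 'n'] d.toList <;>
      cases h3 : PySem.Chars.isIn ['a', 'p', 'i'] d.toList <;>
        cases h4 : PySem.Chars.isIn ['t', 'i', 'm', 'e', 'o', 'u', 't'] d.toList <;>
          cases h5 : PySem.Chars.isIn ['c', 'o', 'm', 'p', 'l', 'e', 'x'] d.toList <;>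
            simp [List.filterMap, h1, h2, h3, h4, h5]

theorem pvFoldl_eq_filterMap (risks : List (List (String × String))) (acc : List (List (String × String))) :
    risks.foldl (fun fallbacks risk =>
        match pvStep risk with
        | some fb => fallbacks ++ [fb]
        | none => fallbacks) acc
      = acc ++ risks.filterMap pvStep := by
  induction risks generalizing acc with
  | nil => simp
  | cons r t ih =>
    simp only [List.foldl_cons, List.filterMap_cons]
    cases pvStep r <;> simp [ih]

-- ===== VERDICT (by name: the statement is the Claim_ definition above) =====
theorem generate_fallbacks_py_spec : Claim_equal_generate_fallbacks_py := by
  intro plan risks _ _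
  unfold Spec_generate_fallbacks_py generate_fallbacks_py generate_fallbacks_py_alt
  have hstep : ∀ (fallbacks : List (List (String × String))) (risk : List (String × String)),
      (let description := PySem.Str.lower ((risk.lookup "description").getD "")
       if PySem.Str.isIn "data" description || PySem.Str.isIn "transaction" description then
         fallbacks ++ [pvFbData]
       else if PySem.Str.isIn "api" description then
         fallbacks ++ [pvFbApi]
       else if PySem.Str.isIn "timeout" description || PySem.Str.isIn "complex" description then
         fallbacks ++ [pvFbTimeout]
       else fallbacks)
      = (match pvStep risk with
        | some fb => fallbacks ++ [fb]
        | none => fallbacks) := by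
    intro fallbacks risk
    simp only [pvStep]
    split_ifs <;> rfl
  simp only [hstep, pvFoldl_eq_filterMap, List.nil_append, List.filterMap_map]
  exact List.filterMap_congr (fun risk _ => pvStep_eq_classify risk)
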